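/-
  EVERY SSE INSTRUCTION FORM OF THE stb_vorbis IMAGE THROUGH ITS RULE.

  For each of the 51 forms (mnemonic × operand shape × addressing mode; representative bytes taken from
  `c7/vorbis_f_insns.txt`, chosen by `c/sse_forms.py`) the instruction is decoded by the model's decoder (`#decode`: a kernel-checked
  `Dec.IsInsn` fact), and the rule of UserX/Sse.lean for its family is applied to THE BODY AS DECODED — the encoding literal,
  the operand literals. `Legacy e` holds of every decoded encoding by `⟨rfl, rfl, rfl⟩`.

  The hypotheses of a test are the side conditions of the rules, for every memory operand at once (`hmem`, `hal`): a client has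
  them for the one operand of the instruction. The conclusion is the body's `wpUser` with NO FAULT ALLOWED, which is what
  `User.Step.of_instr` asks for.
-/
import UserX.Sse
import UserX.SseStart
set_option linter.unusedSectionVars false
set_option linter.unusedSimpArgs false
open X86 X86.User X86.Sem

open Lean Elab Term Meta in
/-- The body of the instruction a `#decode` fact is about: the third argument of `Sem.instr keep len body`. -/
elab "bodyOf% " id:ident : term => do
  let c ← realizeGlobalConstNoOverloadWithInfo id
  let info ← getConstInfo c
  let t := info.type
  unless t.isAppOfArity ``X86.Dec.IsInsn 5 do throwError "bodyOf%: not an IsInsn fact"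
  let s := t.getArg! 3
  unless s.isAppOfArity ``X86.Sem.instr 3 do throwError "bodyOf%: not Sem.instr"
  return s.getArg! 2

open Lean Elab Term Meta in
/-- The whole instruction term `Sem.instr keep len body` a `#decode` fact is about. -/
elab "insnOf% " id:ident : term => do
  let c ← realizeGlobalConstNoOverloadWithInfo id
  let info ← getConstInfo c
  let t := info.type
  unless t.isAppOfArity ``X86.Dec.IsInsn 5 do throwError "insnOf%: not an IsInsn fact"
  return t.getArg! 3

/-- 64-bit mode, Intel; the feature answers play no part in decoding these rows. -/
def um : DecMode :=
  { in64 := true, defaultOperandBits := 32, defaultAddressBits := 64, vendor := .intel, has := fun _ => true }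

/-! ### The decode facts -/

-- addsd xmm0,QWORD PTR [rip+0x153a5]   (12 in the image)
#decode d_addsd_x_m64_rip um [0xf2, 0x0f, 0x58, 0x05, 0xa5, 0x53, 0x01, 0x00]
-- addsd xmm0,xmm1   (21 in the image)
#decode d_addsd_x_x um [0xf2, 0x0f, 0x58, 0xc1]
-- addss xmm0,DWORD PTR [rsp+0x8]   (53 in the image)
#decode d_addss_x_m32_base um [0xf3, 0x0f, 0x58, 0x44, 0x24, 0x08]
-- addss xmm0,DWORD PTR [rip+0x1ca69]   (2 in the image)
#decode d_addss_x_m32_rip um [0xf3, 0x0f, 0x58, 0x05, 0x69, 0xca, 0x01, 0x00]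
-- addss xmm0,xmm1   (38 in the image)
#decode d_addss_x_x um [0xf3, 0x0f, 0x58, 0xc1]
-- comisd xmm0,QWORD PTR [rip+0x154ce]   (3 in the image)
#decode d_comisd_x_m64_rip um [0x66, 0x0f, 0x2f, 0x05, 0xce, 0x54, 0x01, 0x00]
-- comisd xmm1,xmm0   (11 in the image)
#decode d_comisd_x_x um [0x66, 0x0f, 0x2f, 0xc8]
-- comiss xmm2,xmm0   (3 in the image)
#decode d_comiss_x_x um [0x0f, 0x2f, 0xd0]
-- cvtsd2ss xmm0,xmm0   (11 in the image)
#decode d_cvtsd2ss_x_x um [0xf2, 0x0f, 0x5a, 0xc0]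
-- cvtsi2sd xmm2,DWORD PTR [rsp+0xc]   (2 in the image)
#decode d_cvtsi2sd_x_m32_base um [0xf2, 0x0f, 0x2a, 0x54, 0x24, 0x0c]
-- cvtsi2sd xmm3,r12d   (8 in the image)
#decode d_cvtsi2sd_x_r32 um [0xf2, 0x41, 0x0f, 0x2a, 0xdc]
-- cvtsi2sd xmm0,rcx   (4 in the image)
#decode d_cvtsi2sd_x_r64 um [0xf2, 0x48, 0x0f, 0x2a, 0xc1]
-- cvtsi2ss xmm0,edi   (6 in the image)
#decode d_cvtsi2ss_x_r32 um [0xf3, 0x0f, 0x2a, 0xc7]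
-- cvtss2sd xmm0,DWORD PTR [rsp+0xc]   (1 in the image)
#decode d_cvtss2sd_x_m32_base um [0xf3, 0x0f, 0x5a, 0x44, 0x24, 0x0c]
-- cvtss2sd xmm0,xmm0   (6 in the image)
#decode d_cvtss2sd_x_x um [0xf3, 0x0f, 0x5a, 0xc0]
-- cvttsd2si ebp,xmm0   (6 in the image)
#decode d_cvttsd2si_r32_x um [0xf2, 0x0f, 0x2c, 0xe8]
-- cvttsd2si rax,xmm0   (1 in the image)
#decode d_cvttsd2si_r64_x um [0xf2, 0x48, 0x0f, 0x2c, 0xc0]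
-- divsd xmm0,QWORD PTR [rsp+0x28]   (1 in the image)
#decode d_divsd_x_m64_base um [0xf2, 0x0f, 0x5e, 0x44, 0x24, 0x28]
-- divsd xmm3,QWORD PTR [rip+0x156b2]   (26 in the image)
#decode d_divsd_x_m64_rip um [0xf2, 0x0f, 0x5e, 0x1d, 0xb2, 0x56, 0x01, 0x00]
-- divsd xmm0,xmm2   (6 in the image)
#decode d_divsd_x_x um [0xf2, 0x0f, 0x5e, 0xc2]
-- divss xmm0,xmm1   (1 in the image)
#decode d_divss_x_x um [0xf3, 0x0f, 0x5e, 0xc1]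
-- movapd xmm1,xmm3   (61 in the image)
#decode d_movapd_x_x um [0x66, 0x0f, 0x28, 0xcb]
-- movaps xmm0,xmm4   (45 in the image)
#decode d_movaps_x_x um [0x0f, 0x28, 0xc4]
-- movd r13d,xmm3   (35 in the image)
#decode d_movd_r32_x um [0x66, 0x41, 0x0f, 0x7e, 0xdd]
-- movd xmm2,r15d   (93 in the image)
#decode d_movd_x_r32 um [0x66, 0x41, 0x0f, 0x6e, 0xd7]
-- movdqu xmm0,XMMWORD PTR [rbp+0x0]   (1 in the image)
#decode d_movdqu_x_m128_base um [0xf3, 0x0f, 0x6f, 0x45, 0x00]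
-- movq r12,xmm3   (6 in the image)
#decode d_movq_r64_x um [0x66, 0x49, 0x0f, 0x7e, 0xdc]
-- movq xmm1,r12   (13 in the image)
#decode d_movq_x_r64 um [0x66, 0x49, 0x0f, 0x6e, 0xcc]
-- movsd QWORD PTR [rsp+0x28],xmm2   (9 in the image)
#decode d_movsd_m64_base_x um [0xf2, 0x0f, 0x11, 0x54, 0x24, 0x28]
-- movsd xmm0,QWORD PTR [rsp+0x30]   (7 in the image)
#decode d_movsd_x_m64_base um [0xf2, 0x0f, 0x10, 0x44, 0x24, 0x30]
-- movsd xmm1,QWORD PTR [rip+0x1c7a8]   (12 in the image)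
#decode d_movsd_x_m64_rip um [0xf2, 0x0f, 0x10, 0x0d, 0xa8, 0xc7, 0x01, 0x00]
-- movss DWORD PTR [rsp+0x8],xmm6   (244 in the image)
#decode d_movss_m32_base_x um [0xf3, 0x0f, 0x11, 0x74, 0x24, 0x08]
-- movss xmm6,DWORD PTR [rbx]   (217 in the image)
#decode d_movss_x_m32_base um [0xf3, 0x0f, 0x10, 0x33]
-- movss xmm1,DWORD PTR [rip+0x1f05c]   (1 in the image)
#decode d_movss_x_m32_rip um [0xf3, 0x0f, 0x10, 0x0d, 0x5c, 0xf0, 0x01, 0x00]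
-- movups XMMWORD PTR [rbx+0x70],xmm0   (1 in the image)
#decode d_movups_m128_base_x um [0x0f, 0x11, 0x43, 0x70]
-- mulsd xmm0,QWORD PTR [rsp]   (2 in the image)
#decode d_mulsd_x_m64_base um [0xf2, 0x0f, 0x59, 0x04, 0x24]
-- mulsd xmm0,QWORD PTR [rip+0x1c98b]   (19 in the image)
#decode d_mulsd_x_m64_rip um [0xf2, 0x0f, 0x59, 0x05, 0x8b, 0xc9, 0x01, 0x00]
-- mulsd xmm0,xmm1   (52 in the image)
#decode d_mulsd_x_x um [0xf2, 0x0f, 0x59, 0xc1]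
-- mulss xmm3,DWORD PTR [rbp+0x0]   (56 in the image)
#decode d_mulss_x_m32_base um [0xf3, 0x0f, 0x59, 0x5d, 0x00]
-- mulss xmm0,DWORD PTR [rip+0x1c8c5]   (2 in the image)
#decode d_mulss_x_m32_rip um [0xf3, 0x0f, 0x59, 0x05, 0xc5, 0xc8, 0x01, 0x00]
-- mulss xmm0,DWORD PTR [r13*4+0x1202e0]   (3 in the image)
#decode d_mulss_x_m32_sib um [0xf3, 0x42, 0x0f, 0x59, 0x04, 0xad, 0xe0, 0x02, 0x12, 0x00]
-- mulss xmm0,xmm0   (41 in the image)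
#decode d_mulss_x_x um [0xf3, 0x0f, 0x59, 0xc0]
-- pxor xmm0,xmm0   (37 in the image)
#decode d_pxor_x_x um [0x66, 0x0f, 0xef, 0xc0]
-- subsd xmm1,QWORD PTR [rip+0x15412]   (1 in the image)
#decode d_subsd_x_m64_rip um [0xf2, 0x0f, 0x5c, 0x0d, 0x12, 0x54, 0x01, 0x00]
-- subsd xmm4,xmm3   (25 in the image)
#decode d_subsd_x_x um [0xf2, 0x0f, 0x5c, 0xe3]
-- subss xmm4,DWORD PTR [rbx-0x4]   (16 in the image)
#decode d_subss_x_m32_base um [0xf3, 0x0f, 0x5c, 0x63, 0xfc]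
-- subss xmm2,xmm6   (65 in the image)
#decode d_subss_x_x um [0xf3, 0x0f, 0x5c, 0xd6]
-- ucomisd xmm4,xmm4   (4 in the image)
#decode d_ucomisd_x_x um [0x66, 0x0f, 0x2e, 0xe4]
-- xorpd xmm0,XMMWORD PTR [rip+0x1caba]   (4 in the image)
#decode d_xorpd_x_m128_rip um [0x66, 0x0f, 0x57, 0x05, 0xba, 0xca, 0x01, 0x00]
-- xorps xmm0,XMMWORD PTR [rip+0x1dca6]   (13 in the image)
#decode d_xorps_x_m128_rip um [0x0f, 0x57, 0x05, 0xa6, 0xdc, 0x01, 0x00]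
-- xorps xmm0,xmm1   (2 in the image)
#decode d_xorps_x_x um [0x0f, 0x57, 0xc1]

/-! ### The rules applied -/

section
variable {L : Layout} {μ : Microarch} {Q : Unit → State → Prop} {u : State}
  (hμ : SseMicro μ) (hs : SseOK u) (hfl : FlagsOK u.flags)
  -- the side conditions, for whatever operand the instruction has
  (hmem : ∀ (a : MemOp) (n : Nat), L.Has (u.ea a) n) (hal : ∀ a : MemOp, (u.ea a).aligned 16 = true)
  -- any state will do afterwards: the tests are about the rule applying, not about the new state
  (hQ : ∀ u', Q () u')
include hμ hs hfl hmem hal hQ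

/-- `addsd xmm0,QWORD PTR [rip+0x153a5]` -/
theorem t_addsd_x_m64_rip : wpUser L μ (bodyOf% d_addsd_x_m64_rip) Q (fun _ _ => False) u := by
  unfold Insn.ADDSD.addsd
  exact wpUser_scalarFpArith_mem_opaque ⟨rfl, rfl, rfl⟩ hμ hs _ (Or.inr rfl) (Or.inr rfl) _ _ _ _ _ (hmem _ _) (fun _ _ _ => hQ _)

/-- `addsd xmm0,xmm1` -/
theorem t_addsd_x_x : wpUser L μ (bodyOf% d_addsd_x_x) Q (fun _ _ => False) u := by
  unfold Insn.ADDSD.addsd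
  exact wpUser_scalarFpArith_reg_opaque ⟨rfl, rfl, rfl⟩ hs _ (Or.inr rfl) _ _ _ _ _ (fun _ _ _ => hQ _)

/-- `addss xmm0,DWORD PTR [rsp+0x8]` -/
theorem t_addss_x_m32_base : wpUser L μ (bodyOf% d_addss_x_m32_base) Q (fun _ _ => False) u := by
  unfold Insn.ADDSS.addss
  exact wpUser_scalarFpArith_mem_opaque ⟨rfl, rfl, rfl⟩ hμ hs _ (Or.inl rfl) (Or.inl rfl) _ _ _ _ _ (hmem _ _) (fun _ _ _ => hQ _)

/-- `addss xmm0,DWORD PTR [rip+0x1ca69]` -/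
theorem t_addss_x_m32_rip : wpUser L μ (bodyOf% d_addss_x_m32_rip) Q (fun _ _ => False) u := by
  unfold Insn.ADDSS.addss
  exact wpUser_scalarFpArith_mem_opaque ⟨rfl, rfl, rfl⟩ hμ hs _ (Or.inl rfl) (Or.inl rfl) _ _ _ _ _ (hmem _ _) (fun _ _ _ => hQ _)

/-- `addss xmm0,xmm1` -/
theorem t_addss_x_x : wpUser L μ (bodyOf% d_addss_x_x) Q (fun _ _ => False) u := by
  unfold Insn.ADDSS.addss
  exact wpUser_scalarFpArith_reg_opaque ⟨rfl, rfl, rfl⟩ hs _ (Or.inl rfl) _ _ _ _ _ (fun _ _ _ => hQ _)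

/-- `comisd xmm0,QWORD PTR [rip+0x154ce]` -/
theorem t_comisd_x_m64_rip : wpUser L μ (bodyOf% d_comisd_x_m64_rip) Q (fun _ _ => False) u := by
  unfold Insn.COMISD.comisd
  exact wpUser_comis ⟨rfl, rfl, rfl⟩ hμ hs hfl _ _ (Or.inr rfl) _ (Or.inr rfl) _ _ _ (hmem _ _) (fun _ _ _ => hQ _)

/-- `comisd xmm1,xmm0` -/
theorem t_comisd_x_x : wpUser L μ (bodyOf% d_comisd_x_x) Q (fun _ _ => False) u := by
  unfold Insn.COMISD.comisd
  exact wpUser_comis ⟨rfl, rfl, rfl⟩ hμ hs hfl _ _ (Or.inr rfl) _ (Or.inr rfl) _ _ _ trivial (fun _ _ _ => hQ _)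

/-- `comiss xmm2,xmm0` -/
theorem t_comiss_x_x : wpUser L μ (bodyOf% d_comiss_x_x) Q (fun _ _ => False) u := by
  unfold Insn.COMISS.comiss
  exact wpUser_comis ⟨rfl, rfl, rfl⟩ hμ hs hfl _ _ (Or.inl rfl) _ (Or.inl rfl) _ _ _ trivial (fun _ _ _ => hQ _)

/-- `cvtsd2ss xmm0,xmm0` -/
theorem t_cvtsd2ss_x_x : wpUser L μ (bodyOf% d_cvtsd2ss_x_x) Q (fun _ _ => False) u := by
  exact wpUser_cvtsd2ss ⟨rfl, rfl, rfl⟩ hμ hs _ _ _ trivial (fun _ _ _ => hQ _)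

/-- `cvtsi2sd xmm2,DWORD PTR [rsp+0xc]` -/
theorem t_cvtsi2sd_x_m32_base : wpUser L μ (bodyOf% d_cvtsi2sd_x_m32_base) Q (fun _ _ => False) u := by
  refine wpUser_cvtsi2sd ⟨rfl, rfl, rfl⟩ hμ hs _ _ _ ?_ (fun _ _ _ => hQ _)
  simp [GprSrcOK, hmem]

/-- `cvtsi2sd xmm3,r12d` -/
theorem t_cvtsi2sd_x_r32 : wpUser L μ (bodyOf% d_cvtsi2sd_x_r32) Q (fun _ _ => False) u := by
  refine wpUser_cvtsi2sd ⟨rfl, rfl, rfl⟩ hμ hs _ _ _ ?_ (fun _ _ _ => hQ _)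
  simp [GprSrcOK, hmem]

/-- `cvtsi2sd xmm0,rcx` -/
theorem t_cvtsi2sd_x_r64 : wpUser L μ (bodyOf% d_cvtsi2sd_x_r64) Q (fun _ _ => False) u := by
  refine wpUser_cvtsi2sd ⟨rfl, rfl, rfl⟩ hμ hs _ _ _ ?_ (fun _ _ _ => hQ _)
  simp [GprSrcOK, hmem]

/-- `cvtsi2ss xmm0,edi` -/
theorem t_cvtsi2ss_x_r32 : wpUser L μ (bodyOf% d_cvtsi2ss_x_r32) Q (fun _ _ => False) u := by
  refine wpUser_cvtsi2ss ⟨rfl, rfl, rfl⟩ hμ hs _ _ _ ?_ (fun _ _ _ => hQ _)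
  simp [GprSrcOK, hmem]

/-- `cvtss2sd xmm0,DWORD PTR [rsp+0xc]` -/
theorem t_cvtss2sd_x_m32_base : wpUser L μ (bodyOf% d_cvtss2sd_x_m32_base) Q (fun _ _ => False) u := by
  exact wpUser_cvtss2sd ⟨rfl, rfl, rfl⟩ hμ hs _ _ _ (hmem _ _) (fun _ _ _ => hQ _)

/-- `cvtss2sd xmm0,xmm0` -/
theorem t_cvtss2sd_x_x : wpUser L μ (bodyOf% d_cvtss2sd_x_x) Q (fun _ _ => False) u := by
  exact wpUser_cvtss2sd ⟨rfl, rfl, rfl⟩ hμ hs _ _ _ trivial (fun _ _ _ => hQ _)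

/-- `cvttsd2si ebp,xmm0` -/
theorem t_cvttsd2si_r32_x : wpUser L μ (bodyOf% d_cvttsd2si_r32_x) Q (fun _ _ => False) u := by
  exact wpUser_cvttsd2si ⟨rfl, rfl, rfl⟩ hμ hs _ (by decide) _ _ trivial (fun _ _ _ => hQ _)

/-- `cvttsd2si rax,xmm0` -/
theorem t_cvttsd2si_r64_x : wpUser L μ (bodyOf% d_cvttsd2si_r64_x) Q (fun _ _ => False) u := by
  exact wpUser_cvttsd2si ⟨rfl, rfl, rfl⟩ hμ hs _ (by decide) _ _ trivial (fun _ _ _ => hQ _)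

/-- `divsd xmm0,QWORD PTR [rsp+0x28]` -/
theorem t_divsd_x_m64_base : wpUser L μ (bodyOf% d_divsd_x_m64_base) Q (fun _ _ => False) u := by
  unfold Insn.DIVSD.divsd
  exact wpUser_scalarFpDiv_mem_opaque ⟨rfl, rfl, rfl⟩ hμ hs _ (Or.inr rfl) (Or.inr rfl) _ _ _ _ _ _ (hmem _ _) (fun _ _ _ => hQ _)

/-- `divsd xmm3,QWORD PTR [rip+0x156b2]` -/
theorem t_divsd_x_m64_rip : wpUser L μ (bodyOf% d_divsd_x_m64_rip) Q (fun _ _ => False) u := by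
  unfold Insn.DIVSD.divsd
  exact wpUser_scalarFpDiv_mem_opaque ⟨rfl, rfl, rfl⟩ hμ hs _ (Or.inr rfl) (Or.inr rfl) _ _ _ _ _ _ (hmem _ _) (fun _ _ _ => hQ _)

/-- `divsd xmm0,xmm2` -/
theorem t_divsd_x_x : wpUser L μ (bodyOf% d_divsd_x_x) Q (fun _ _ => False) u := by
  unfold Insn.DIVSD.divsd
  exact wpUser_scalarFpDiv_reg_opaque ⟨rfl, rfl, rfl⟩ hs _ (Or.inr rfl) _ _ _ _ _ _ (fun _ _ _ => hQ _)

/-- `divss xmm0,xmm1` -/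
theorem t_divss_x_x : wpUser L μ (bodyOf% d_divss_x_x) Q (fun _ _ => False) u := by
  unfold Insn.DIVSS.divss
  exact wpUser_scalarFpDiv_reg_opaque ⟨rfl, rfl, rfl⟩ hs _ (Or.inl rfl) _ _ _ _ _ _ (fun _ _ _ => hQ _)

/-- `movapd xmm1,xmm3` -/
theorem t_movapd_x_x : wpUser L μ (bodyOf% d_movapd_x_x) Q (fun _ _ => False) u := by
  exact wpUser_movap_reg ⟨rfl, rfl, rfl⟩ hμ _ (moveSpec_movapd ⟨rfl, rfl, rfl⟩ hμ) _ _ (hQ _)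

/-- `movaps xmm0,xmm4` -/
theorem t_movaps_x_x : wpUser L μ (bodyOf% d_movaps_x_x) Q (fun _ _ => False) u := by
  exact wpUser_movap_reg ⟨rfl, rfl, rfl⟩ hμ _ (moveSpec_movaps ⟨rfl, rfl, rfl⟩ hμ) _ _ (hQ _)

/-- `movd r13d,xmm3` -/
theorem t_movd_r32_x : wpUser L μ (bodyOf% d_movd_r32_x) Q (fun _ _ => False) u := by
  exact wpUser_movd_from_xmm ⟨rfl, rfl, rfl⟩ hμ _ (Or.inl rfl) _ _ (hQ _)

/-- `movd xmm2,r15d` -/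
theorem t_movd_x_r32 : wpUser L μ (bodyOf% d_movd_x_r32) Q (fun _ _ => False) u := by
  exact wpUser_movd_to_xmm ⟨rfl, rfl, rfl⟩ hμ _ _ (Or.inl rfl) _ (hQ _)

/-- `movdqu xmm0,XMMWORD PTR [rbp+0x0]` -/
theorem t_movdqu_x_m128_base : wpUser L μ (bodyOf% d_movdqu_x_m128_base) Q (fun _ _ => False) u := by
  exact wpUser_movu_load ⟨rfl, rfl, rfl⟩ hμ _ (moveSpec_movdqu ⟨rfl, rfl, rfl⟩ hμ) rfl _ _ (hmem _ _) (hQ _)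

/-- `movq r12,xmm3` -/
theorem t_movq_r64_x : wpUser L μ (bodyOf% d_movq_r64_x) Q (fun _ _ => False) u := by
  exact wpUser_movd_from_xmm ⟨rfl, rfl, rfl⟩ hμ _ (Or.inr rfl) _ _ (hQ _)

/-- `movq xmm1,r12` -/
theorem t_movq_x_r64 : wpUser L μ (bodyOf% d_movq_x_r64) Q (fun _ _ => False) u := by
  exact wpUser_movd_to_xmm ⟨rfl, rfl, rfl⟩ hμ _ _ (Or.inr rfl) _ (hQ _)

/-- `movsd QWORD PTR [rsp+0x28],xmm2` -/
theorem t_movsd_m64_base_x : wpUser L μ (bodyOf% d_movsd_m64_base_x) Q (fun _ _ => False) u := by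
  exact wpUser_movsd_store ⟨rfl, rfl, rfl⟩ hμ _ _ (hmem _ _) (hQ _)

/-- `movsd xmm0,QWORD PTR [rsp+0x30]` -/
theorem t_movsd_x_m64_base : wpUser L μ (bodyOf% d_movsd_x_m64_base) Q (fun _ _ => False) u := by
  exact wpUser_movsd_load ⟨rfl, rfl, rfl⟩ hμ _ _ (hmem _ _) (hQ _)

/-- `movsd xmm1,QWORD PTR [rip+0x1c7a8]` -/
theorem t_movsd_x_m64_rip : wpUser L μ (bodyOf% d_movsd_x_m64_rip) Q (fun _ _ => False) u := by
  exact wpUser_movsd_load ⟨rfl, rfl, rfl⟩ hμ _ _ (hmem _ _) (hQ _)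

/-- `movss DWORD PTR [rsp+0x8],xmm6` -/
theorem t_movss_m32_base_x : wpUser L μ (bodyOf% d_movss_m32_base_x) Q (fun _ _ => False) u := by
  exact wpUser_movss_store ⟨rfl, rfl, rfl⟩ hμ _ _ (hmem _ _) (hQ _)

/-- `movss xmm6,DWORD PTR [rbx]` -/
theorem t_movss_x_m32_base : wpUser L μ (bodyOf% d_movss_x_m32_base) Q (fun _ _ => False) u := by
  exact wpUser_movss_load ⟨rfl, rfl, rfl⟩ hμ _ _ (hmem _ _) (hQ _)

/-- `movss xmm1,DWORD PTR [rip+0x1f05c]` -/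
theorem t_movss_x_m32_rip : wpUser L μ (bodyOf% d_movss_x_m32_rip) Q (fun _ _ => False) u := by
  exact wpUser_movss_load ⟨rfl, rfl, rfl⟩ hμ _ _ (hmem _ _) (hQ _)

/-- `movups XMMWORD PTR [rbx+0x70],xmm0` -/
theorem t_movups_m128_base_x : wpUser L μ (bodyOf% d_movups_m128_base_x) Q (fun _ _ => False) u := by
  exact wpUser_movu_store ⟨rfl, rfl, rfl⟩ hμ _ (moveSpec_movups ⟨rfl, rfl, rfl⟩ hμ) rfl _ _ (hmem _ _) (hQ _)

/-- `mulsd xmm0,QWORD PTR [rsp]` -/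
theorem t_mulsd_x_m64_base : wpUser L μ (bodyOf% d_mulsd_x_m64_base) Q (fun _ _ => False) u := by
  unfold Insn.MULSD.mulsd
  exact wpUser_scalarFpArith_mem_opaque ⟨rfl, rfl, rfl⟩ hμ hs _ (Or.inr rfl) (Or.inr rfl) _ _ _ _ _ (hmem _ _) (fun _ _ _ => hQ _)

/-- `mulsd xmm0,QWORD PTR [rip+0x1c98b]` -/
theorem t_mulsd_x_m64_rip : wpUser L μ (bodyOf% d_mulsd_x_m64_rip) Q (fun _ _ => False) u := by
  unfold Insn.MULSD.mulsd
  exact wpUser_scalarFpArith_mem_opaque ⟨rfl, rfl, rfl⟩ hμ hs _ (Or.inr rfl) (Or.inr rfl) _ _ _ _ _ (hmem _ _) (fun _ _ _ => hQ _)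

/-- `mulsd xmm0,xmm1` -/
theorem t_mulsd_x_x : wpUser L μ (bodyOf% d_mulsd_x_x) Q (fun _ _ => False) u := by
  unfold Insn.MULSD.mulsd
  exact wpUser_scalarFpArith_reg_opaque ⟨rfl, rfl, rfl⟩ hs _ (Or.inr rfl) _ _ _ _ _ (fun _ _ _ => hQ _)

/-- `mulss xmm3,DWORD PTR [rbp+0x0]` -/
theorem t_mulss_x_m32_base : wpUser L μ (bodyOf% d_mulss_x_m32_base) Q (fun _ _ => False) u := by
  unfold Insn.MULSS.mulss
  exact wpUser_scalarFpArith_mem_opaque ⟨rfl, rfl, rfl⟩ hμ hs _ (Or.inl rfl) (Or.inl rfl) _ _ _ _ _ (hmem _ _) (fun _ _ _ => hQ _)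

/-- `mulss xmm0,DWORD PTR [rip+0x1c8c5]` -/
theorem t_mulss_x_m32_rip : wpUser L μ (bodyOf% d_mulss_x_m32_rip) Q (fun _ _ => False) u := by
  unfold Insn.MULSS.mulss
  exact wpUser_scalarFpArith_mem_opaque ⟨rfl, rfl, rfl⟩ hμ hs _ (Or.inl rfl) (Or.inl rfl) _ _ _ _ _ (hmem _ _) (fun _ _ _ => hQ _)

/-- `mulss xmm0,DWORD PTR [r13*4+0x1202e0]` -/
theorem t_mulss_x_m32_sib : wpUser L μ (bodyOf% d_mulss_x_m32_sib) Q (fun _ _ => False) u := by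
  unfold Insn.MULSS.mulss
  exact wpUser_scalarFpArith_mem_opaque ⟨rfl, rfl, rfl⟩ hμ hs _ (Or.inl rfl) (Or.inl rfl) _ _ _ _ _ (hmem _ _) (fun _ _ _ => hQ _)

/-- `mulss xmm0,xmm0` -/
theorem t_mulss_x_x : wpUser L μ (bodyOf% d_mulss_x_x) Q (fun _ _ => False) u := by
  unfold Insn.MULSS.mulss
  exact wpUser_scalarFpArith_reg_opaque ⟨rfl, rfl, rfl⟩ hs _ (Or.inl rfl) _ _ _ _ _ (fun _ _ _ => hQ _)

/-- `pxor xmm0,xmm0` -/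
theorem t_pxor_x_x : wpUser L μ (bodyOf% d_pxor_x_x) Q (fun _ _ => False) u := by
  exact wpUser_packedLogic_reg ⟨rfl, rfl, rfl⟩ hμ _ _ _ _ _ (hQ _)

/-- `subsd xmm1,QWORD PTR [rip+0x15412]` -/
theorem t_subsd_x_m64_rip : wpUser L μ (bodyOf% d_subsd_x_m64_rip) Q (fun _ _ => False) u := by
  unfold Insn.SUBSD.subsd
  exact wpUser_scalarFpArith_mem_opaque ⟨rfl, rfl, rfl⟩ hμ hs _ (Or.inr rfl) (Or.inr rfl) _ _ _ _ _ (hmem _ _) (fun _ _ _ => hQ _)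

/-- `subsd xmm4,xmm3` -/
theorem t_subsd_x_x : wpUser L μ (bodyOf% d_subsd_x_x) Q (fun _ _ => False) u := by
  unfold Insn.SUBSD.subsd
  exact wpUser_scalarFpArith_reg_opaque ⟨rfl, rfl, rfl⟩ hs _ (Or.inr rfl) _ _ _ _ _ (fun _ _ _ => hQ _)

/-- `subss xmm4,DWORD PTR [rbx-0x4]` -/
theorem t_subss_x_m32_base : wpUser L μ (bodyOf% d_subss_x_m32_base) Q (fun _ _ => False) u := by
  unfold Insn.SUBSS.subss
  exact wpUser_scalarFpArith_mem_opaque ⟨rfl, rfl, rfl⟩ hμ hs _ (Or.inl rfl) (Or.inl rfl) _ _ _ _ _ (hmem _ _) (fun _ _ _ => hQ _)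

/-- `subss xmm2,xmm6` -/
theorem t_subss_x_x : wpUser L μ (bodyOf% d_subss_x_x) Q (fun _ _ => False) u := by
  unfold Insn.SUBSS.subss
  exact wpUser_scalarFpArith_reg_opaque ⟨rfl, rfl, rfl⟩ hs _ (Or.inl rfl) _ _ _ _ _ (fun _ _ _ => hQ _)

/-- `ucomisd xmm4,xmm4` -/
theorem t_ucomisd_x_x : wpUser L μ (bodyOf% d_ucomisd_x_x) Q (fun _ _ => False) u := by
  unfold Insn.UCOMISD.ucomisd
  exact wpUser_comis ⟨rfl, rfl, rfl⟩ hμ hs hfl _ _ (Or.inr rfl) _ (Or.inr rfl) _ _ _ trivial (fun _ _ _ => hQ _)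

/-- `xorpd xmm0,XMMWORD PTR [rip+0x1caba]` -/
theorem t_xorpd_x_m128_rip : wpUser L μ (bodyOf% d_xorpd_x_m128_rip) Q (fun _ _ => False) u := by
  exact wpUser_fpLogic_mem ⟨rfl, rfl, rfl⟩ hμ (Or.inr rfl) _ (Or.inr rfl) _ _ _ _ _ (hal _) (hmem _ _) (fun _ => hQ _)

/-- `xorps xmm0,XMMWORD PTR [rip+0x1dca6]` -/
theorem t_xorps_x_m128_rip : wpUser L μ (bodyOf% d_xorps_x_m128_rip) Q (fun _ _ => False) u := by
  exact wpUser_fpLogic_mem ⟨rfl, rfl, rfl⟩ hμ (Or.inl rfl) _ (Or.inl rfl) _ _ _ _ _ (hal _) (hmem _ _) (fun _ => hQ _)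

/-- `xorps xmm0,xmm1` -/
theorem t_xorps_x_x : wpUser L μ (bodyOf% d_xorps_x_x) Q (fun _ _ => False) u := by
  exact wpUser_fpLogic_reg ⟨rfl, rfl, rfl⟩ hμ (Or.inl rfl) _ (Or.inl rfl) _ _ _ _ _ (fun _ => hQ _)

end

/-! ### One whole instruction as a `User.Step`

From the decode fact at `u.rip` (`User.Decodes`: the decode bridge's conclusion) to `User.Step`, with the rule's side condition
stated for the state with RIP advanced (a RIP-relative operand is relative to the next instruction). -/

section
variable {L : Layout} {μ : Microarch} {u : State}

/-- `movss xmm6, DWORD PTR [rbx]` (4 bytes long): XMM6 changes, RIP advances, nothing else. -/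
theorem step_movss_load (hμ : SseMicro μ) (hd : Decodes L μ u (insnOf% d_movss_x_m32_base))
    (hhas : L.Has (u.reg .rbx) 4) :
    Step L μ u (fun u' => ∃ v : Vec, u' = (u.setRip (u.rip + 4)).writeVecLow .v128 6 v) := by
  refine Step.of_instr _ _ _ hd ?_
  intro m _
  refine wpUser_movss_load_opaque ⟨rfl, rfl, rfl⟩ hμ _ _ ?_ (fun v => ⟨v, rfl⟩)
  have e : (u.setRip (u.rip + 4)).ea { base := some Reg.rbx } = u.reg .rbx := by
    simp [State.ea_addr64, State.setRip, State.reg]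
  show L.Has ((u.setRip (u.rip + 4)).ea { base := some Reg.rbx }) 4
  rw [e]
  exact hhas

/-- `addss xmm0, xmm1`: XMM0 and the sticky MXCSR flags change; `SseOK` is kept. -/
theorem step_addss (hs : SseOK u) (hd : Decodes L μ u (insnOf% d_addss_x_x)) :
    Step L μ u (fun u' => SseOK u' ∧ u'.regs = u.regs ∧ u'.mem = u.mem ∧ u'.flags = u.flags ∧ u'.rip = u.rip + 4) := by
  refine Step.of_instr _ _ _ hd ?_
  intro m _
  have hs' : SseOK (u.setRip (u.rip + 4)) := hs.of_mxcsr rfl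
  unfold Insn.ADDSS.addss
  refine wpUser_scalarFpArith_reg ⟨rfl, rfl, rfl⟩ hs' _ (Or.inl rfl) _ _ _ _ _ ?_
  exact ⟨hs'.fpResult _ _ _, rfl, rfl, rfl, rfl⟩

end

/-! ### What the rules rest on -/

#print axioms X86.Sem.wpUser_movss_store
#print axioms X86.Sem.wpUser_scalarFpArith_mem
#print axioms X86.Sem.wpUser_comis
#print axioms X86.Sem.wpUser_fpLogic_mem
#print axioms X86.Sem.movu_roundtrip
#print axioms X86.User.sseMicro_interp
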